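-- pv_equiv track=rewrite | github.com/Reditiny/USACO | USACO Trianing Learning Path/Chapter 2/Section 2/party_lamps/party_lamps_no_bit.py | button_4
-- ===== SOURCE A (Python) =====
-- def button_4(cur_status_list):
--     result = []
--     for i in range(len(cur_status_list)):
--         if i % 3 == 0:
--             result.append(1 - cur_status_list[i])
--         else:
--             result.append(cur_status_list[i])
--     return result
-- ===== SOURCE B (Python) =====
-- def button_4(cur_status_list):
--     result = list(cur_status_list)
--     result[::3] = [1 - v for v in cur_status_list[::3]]
--     return result
-- ===== Notes on version B (the rewrite author's own statement) =====
-- stated objective: idiomatic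
-- what changed: B works in staged whole-slice passes: it copies the list, extracts the stride-3 slice l[::3], maps 1-v over it, and writes it back with extended-slice assignment, eliminating A's element-by-element loop with a modulo branch.
import Mathlib
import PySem

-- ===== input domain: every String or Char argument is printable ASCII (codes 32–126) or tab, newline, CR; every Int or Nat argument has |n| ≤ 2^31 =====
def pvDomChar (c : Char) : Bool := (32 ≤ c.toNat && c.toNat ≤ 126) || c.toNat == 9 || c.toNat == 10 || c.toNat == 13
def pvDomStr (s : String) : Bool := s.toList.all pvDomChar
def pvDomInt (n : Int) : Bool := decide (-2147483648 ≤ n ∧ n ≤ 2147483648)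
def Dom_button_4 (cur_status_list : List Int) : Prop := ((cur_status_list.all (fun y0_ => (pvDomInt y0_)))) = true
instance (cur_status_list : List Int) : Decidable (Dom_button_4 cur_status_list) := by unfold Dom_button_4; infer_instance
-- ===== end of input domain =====

-- B replaces A's per-element loop with a modulo branch by staged whole-slice passes: copy, extract the stride-3 slice, map 1-v over it, scatter it back (extended-slice assignment).


-- ===== PORT A =====
-- for i in range(len(l)): append 1 - l[i] when i % 3 == 0 else l[i]
def button_4 (cur_status_list : List Int) : List Int :=
  (PySem.List.pyRange 0 (cur_status_list.length : Int) 1).foldl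
    (fun result i =>
      if PySem.Int.mod i 3 = 0 then
        result ++ [1 - PySem.List.pyGetD cur_status_list i 0]
      else
        result ++ [PySem.List.pyGetD cur_status_list i 0]) []

-- ===== PORT B =====
-- PySem has no step-3 slices, so the two extended-slice primitives are ported by hand, exactly:
-- everyThird l = l[::3] (elements at indices 0,3,6,...)
def everyThird (l : List Int) : List Int :=
  match l with
  | [] => []
  | x :: rest => x :: everyThird (rest.drop 2)
termination_by l.length
decreasing_by simp

-- scatter3 l vs = Python's 'result = list(l); result[::3] = vs' (here len(vs) = len(l[::3]) always,
-- so Python's size-mismatch ValueError is unreachable; extra vs would be ignored)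
def scatter3 (l : List Int) (vs : List Int) : List Int :=
  match l, vs with
  | [], _ => []
  | x :: rest, [] => x :: rest
  | _ :: rest, v :: vs => v :: (rest.take 2 ++ scatter3 (rest.drop 2) vs)
termination_by l.length
decreasing_by simp

-- result = list(l); result[::3] = [1 - v for v in l[::3]]; return result
def button_4_alt (cur_status_list : List Int) : List Int :=
  scatter3 cur_status_list ((everyThird cur_status_list).map (fun v => 1 - v))

-- ===== PRECONDITION & SPEC =====
def Spec_button_4 (cur_status_list : List Int) (out : List Int) : Prop := out = button_4_alt cur_status_list
instance (cur_status_list : List Int) (out : List Int) : Decidable (Spec_button_4 cur_status_list out) := by unfold Spec_button_4; infer_instance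

-- ===== CLAIM (what is proved, stated in full; the proofs are below) =====
def Claim_equal_button_4 : Prop := ∀ (cur_status_list : List Int), Dom_button_4 cur_status_list → Spec_button_4 cur_status_list (button_4 cur_status_list)

-- ===== LEMMAS AND PROOFS =====

-- A's loop is a map over the index range
lemma button_4_eq_map (l : List Int) :
    button_4 l = ((PySem.List.pyRange 0 (l.length : Int) 1).map
      (fun i => if PySem.Int.mod i 3 = 0 then 1 - PySem.List.pyGetD l i 0
                else PySem.List.pyGetD l i 0)) := by
  unfold button_4
  rw [show (fun (result : List Int) (i : Int) =>
        if PySem.Int.mod i 3 = 0 then result ++ [1 - PySem.List.pyGetD l i 0]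
        else result ++ [PySem.List.pyGetD l i 0])
      = (fun result i => result ++ [if PySem.Int.mod i 3 = 0 then 1 - PySem.List.pyGetD l i 0
        else PySem.List.pyGetD l i 0]) from by
      funext r i; split_ifs <;> rfl]
  rw [PySem.List.foldl_append_singleton_eq_map]
  rfl

-- element-wise value of A's result
lemma button_4_getElem? (l : List Int) (j : Nat) :
    (button_4 l)[j]? = if j % 3 = 0 then l[j]?.map (fun v => 1 - v) else l[j]? := by
  rw [button_4_eq_map]
  by_cases hj : j < l.length
  · rw [PySem.List.getElem?_map_pyRange_zero _ _ _ hj]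
    have hget : PySem.List.pyGetD l (j : Int) 0 = l[j] := by
      rw [PySem.List.pyGetD_natCast, List.getD_eq_getElem l 0 hj]
    have hmod : PySem.Int.mod (j : Int) 3 = 0 ↔ j % 3 = 0 := by
      rw [PySem.Int.mod_eq_zero_iff_dvd]; omega
    rw [List.getElem?_eq_getElem hj]
    by_cases h : j % 3 = 0
    · rw [if_pos h, if_pos (hmod.mpr h)]; simp [hget]
    · rw [if_neg h, if_neg (fun hh => h (hmod.mp hh))]; simp [hget]
  · have h1 : l[j]? = none := List.getElem?_eq_none (by omega)
    have h2 : (((PySem.List.pyRange 0 (l.length : Int) 1).map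
        (fun i => if PySem.Int.mod i 3 = 0 then 1 - PySem.List.pyGetD l i 0
                  else PySem.List.pyGetD l i 0)))[j]? = none := by
      apply List.getElem?_eq_none
      simp only [List.length_map, PySem.List.length_pyRange_one]
      omega
    rw [h1, h2]; split_ifs <;> rfl

-- element-wise value of B's result
lemma button_4_alt_getElem?_aux (n : Nat) : ∀ (l : List Int), l.length ≤ n →
    ∀ j : Nat, (scatter3 l ((everyThird l).map (fun v => 1 - v)))[j]?
      = if j % 3 = 0 then l[j]?.map (fun v => 1 - v) else l[j]? := by
  induction n with
  | zero =>
    intro l hl j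
    have : l = [] := List.eq_nil_of_length_eq_zero (by omega)
    subst this; simp [everyThird, scatter3]
  | succ n ihn =>
    intro l hl j
    match l with
    | [] => simp [everyThird, scatter3]
    | x :: rest =>
    have ih : ∀ j : Nat, (scatter3 (rest.drop 2) ((everyThird (rest.drop 2)).map (fun v => 1 - v)))[j]?
        = if j % 3 = 0 then (rest.drop 2)[j]?.map (fun v => 1 - v) else (rest.drop 2)[j]? :=
      ihn (rest.drop 2) (by simp at hl ⊢; omega)
    rw [show scatter3 (x :: rest) ((everyThird (x :: rest)).map (fun v => 1 - v))
          = (1 - x) :: (rest.take 2 ++ scatter3 (rest.drop 2) ((everyThird (rest.drop 2)).map (fun v => 1 - v)))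
        from by rw [everyThird]; simp [scatter3]]
    match j with
    | 0 => simp
    | Nat.succ j =>
      simp only [List.getElem?_cons_succ]
      by_cases hlt : j < (rest.take 2).length
      · have hj2 : j < 2 := by simp at hlt; omega
        rw [List.getElem?_append_left hlt, List.getElem?_take_of_lt hj2,
          if_neg (by omega)]
      · rw [List.getElem?_append_right (by omega)]
        by_cases hr : 2 ≤ rest.length
        · have hlen : (rest.take 2).length = 2 := by simp; omega
          have hj2 : 2 ≤ j := by omega
          rw [hlen, ih (j - 2), List.getElem?_drop]
          have harg : 2 + (j - 2) = j := by omega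
          have hmod : (j - 2) % 3 = (j + 1) % 3 := by omega
          rw [harg, hmod]
        · have hlen : (rest.take 2).length = rest.length := by simp; omega
          have hdrop : rest.drop 2 = [] := List.drop_eq_nil_of_le (by omega)
          have hnone : rest[j]? = none := List.getElem?_eq_none (by omega)
          rw [hdrop, hlen, hnone]
          rw [show scatter3 [] ((everyThird []).map (fun v => 1 - v)) = [] from by rw [scatter3]]
          simp only [List.getElem?_nil]
          split_ifs <;> rfl

lemma button_4_alt_getElem? (l : List Int) (j : Nat) :
    (button_4_alt l)[j]? = if j % 3 = 0 then l[j]?.map (fun v => 1 - v) else l[j]? := by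
  unfold button_4_alt; exact button_4_alt_getElem?_aux l.length l le_rfl j

-- ===== VERDICT (by name: the statement is the Claim_ definition above) =====
theorem button_4_spec : Claim_equal_button_4 := by
  intro l _
  unfold Spec_button_4
  apply List.ext_getElem?
  intro j
  rw [button_4_getElem?, button_4_alt_getElem?]
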